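-- pv_equiv track=rewrite | github.com/pardhusnc2004/pushncode_ | 2025/03. March/01/GeeksforGeeks_01-03.py | decodedString
-- ===== SOURCE A (Python) =====
-- def decodedString(s):
--     # code here
--     stack = []
--
--     cur = 0
--     for i in s:
--         if i.isdigit():
--             cur = cur*10+int(i)
--         else:
--             if i == '[':
--                 stack.append(cur)
--                 stack.append(']')
--                 cur = 0
--             elif i == ']':
--                 tmp = ""
--                 while stack and stack[-1] != i:
--                     tmp += stack.pop()
--                 stack.pop()
--                 stack.append(tmp*stack.pop())
--
--             else:
--                 stack.append(i)
--     res = ""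
--     stack.reverse()
--     while stack:
--         res += stack.pop()[::-1]
--     return res
-- ===== SOURCE B (Python) =====
-- def decodedString(s):
--     # Recursive-descent decoder: scan with an index, recurse on '[' to expand
--     # nested groups on the way back up, instead of A's explicit marker stack.
--     def decode(i, cur):
--         out = []
--         while i < len(s):
--             c = s[i]
--             if c.isdigit():
--                 cur = cur * 10 + int(c)
--                 i += 1
--             elif c == '[':
--                 inner, j, ncur = decode(i + 1, 0)
--                 out.append(inner * cur)
--                 i, cur = j, ncur
--             elif c == ']':
--                 return ''.join(out), i + 1, cur
--             else:
--                 out.append(c)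
--                 i += 1
--         return ''.join(out), i, cur
--     return decode(0, 0)[0]
-- ===== Notes on version B (the rewrite author's own statement) =====
-- stated objective: alternative
-- what changed: Replaced A's heterogeneous marker/count stack with reversed segments and a final reverse-each pass by a recursive-descent decoder that scans once with an index, accumulates the multi-digit count, and expands each bracket group by recursion on the way back up.
import Mathlib
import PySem

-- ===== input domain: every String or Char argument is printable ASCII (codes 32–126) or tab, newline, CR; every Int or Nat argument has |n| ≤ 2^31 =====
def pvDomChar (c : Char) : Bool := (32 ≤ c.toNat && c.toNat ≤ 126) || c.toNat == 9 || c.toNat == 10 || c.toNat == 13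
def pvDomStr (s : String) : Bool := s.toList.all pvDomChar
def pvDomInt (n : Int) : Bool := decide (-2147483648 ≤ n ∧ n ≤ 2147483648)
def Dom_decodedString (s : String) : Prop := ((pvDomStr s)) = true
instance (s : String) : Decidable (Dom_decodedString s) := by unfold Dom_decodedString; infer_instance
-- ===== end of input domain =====

-- B replaces A's heterogeneous marker/count stack by a recursive-descent decoder
-- (alternative decomposition, same cost); return value only, neither mutates input.

-- ===== PORT A =====
-- A's stack holds ints (pending counts) and strings; the char ']' is its marker.
inductive PvElem where
  | i : Int → PvElem
  | s : List Char → PvElem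
deriving DecidableEq, Repr

-- the `while stack and stack[-1] != ']'` pop loop (a .i on top is a TypeError in
-- Python, outside Pre_; we stop there with junk)
def pvPopTmp : List Char → List PvElem → List Char × List PvElem
  | tmp, [] => (tmp, [])
  | tmp, PvElem.i n :: st => (tmp, PvElem.i n :: st)
  | tmp, PvElem.s t :: st =>
    if t = [']'] then (tmp, PvElem.s t :: st) else pvPopTmp (tmp ++ t) st

-- Python `tmp * n` for a string tmp and int n
def pvRep (l : List Char) (n : Int) : List Char := (List.replicate n.toNat l).flatten

def pvStepA : List PvElem × Int → Char → List PvElem × Int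
  | (st, cur), c =>
    if c.isDigit then (st, cur * 10 + ((c.toNat : Int) - 48))
    else if c = '[' then (PvElem.s [']'] :: PvElem.i cur :: st, 0)
    else if c = ']' then
      let p := pvPopTmp [] st
      match p.2 with
      | PvElem.s _ :: PvElem.i n :: st2 => (PvElem.s (pvRep p.1 n) :: st2, cur)
      | _ => (p.2, cur)  -- Python raises here (pop from empty / int count of wrong type)
    else (PvElem.s [c] :: st, cur)

-- final `stack.reverse(); while stack: res += stack.pop()[::-1]`
-- (popping a leftover int is a TypeError in Python, outside Pre_; junk [] here)
def pvRender (st : List PvElem) : List Char :=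
  st.reverse.foldl (fun r e => r ++ (match e with | PvElem.s t => t.reverse | PvElem.i _ => [])) []

def decodedString (s : String) : String :=
  String.mk (pvRender (s.toList.foldl pvStepA ([], 0)).1)

-- ===== PORT B =====
-- decode(i, cur) of Source B: returns (decoded text, remaining input, current count).
-- Source B advances an index; here the remaining suffix is passed, with fuel = length+1
-- (fuel only makes the same recursion structural; it is never exhausted).
def pvDecodeB : Nat → List Char → Int → List Char × List Char × Int
  | 0, cs, cur => ([], cs, cur)
  | _ + 1, [], cur => ([], [], cur)
  | fuel + 1, c :: rest, cur =>
    if c.isDigit then pvDecodeB fuel rest (cur * 10 + ((c.toNat : Int) - 48))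
    else if c = '[' then
      let inr := pvDecodeB fuel rest 0
      let out2 := pvDecodeB fuel inr.2.1 inr.2.2
      (pvRep inr.1 cur ++ out2.1, out2.2.1, out2.2.2)
    else if c = ']' then ([], rest, cur)
    else
      let o := pvDecodeB fuel rest cur
      (c :: o.1, o.2.1, o.2.2)

def decodedString_alt (s : String) : String :=
  String.mk (pvDecodeB (s.toList.length + 1) s.toList 0).1

-- ===== PRECONDITION & SPEC =====
-- Pre_ = bracket-balanced strings: exactly the inputs on which A returns normally
-- (an unmatched ']' is an IndexError, an unclosed '[' a TypeError in A).
def Pre_decodedString (s : String) : Prop :=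
  (∀ p ∈ s.toList.inits, List.count ']' p ≤ List.count '[' p) ∧
    List.count '[' s.toList = List.count ']' s.toList

instance (s : String) : Decidable (Pre_decodedString s) := by
  unfold Pre_decodedString; infer_instance

def pvWitness_decodedString : String := "2[a10[b]c]"

def Spec_decodedString (s : String) (out : String) : Prop := out = decodedString_alt s
instance (s : String) (out : String) : Decidable (Spec_decodedString s out) := by unfold Spec_decodedString; infer_instance

-- ===== CLAIM (what is proved, stated in full; the proofs are below) =====
def Claim_equal_decodedString : Prop := ∀ (s : String), Dom_decodedString s → Pre_decodedString s → Spec_decodedString s (decodedString s)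

-- ===== LEMMAS AND PROOFS =====

-- balancedness of a char-list segment
def PvClosed (cs : List Char) : Prop :=
  (∀ p ∈ cs.inits, List.count ']' p ≤ List.count '[' p) ∧
    List.count '[' cs = List.count ']' cs

lemma pvClosed_head (c : Char) (u : List Char) (h : PvClosed (c :: u)) : c ≠ ']' := by
  intro hc
  have := h.1 [c] (by simp)
  subst hc
  simp at this

lemma pvClosed_cons (c : Char) (u : List Char) (hb : c ≠ '[') (hr : c ≠ ']')
    (h : PvClosed (c :: u)) : PvClosed u := by
  constructor
  · intro p hp
    have hm : c :: p ∈ (c :: u).inits := by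
      rw [List.inits_cons]
      exact List.mem_cons_of_mem _ (List.mem_map_of_mem hp)
    have := h.1 (c :: p) hm
    simpa [List.count_cons, hb, hr] using this
  · have := h.2
    simpa [List.count_cons, hb, hr] using this

lemma pvSplit_closed (u : List Char) (h : PvClosed ('[' :: u)) :
    ∃ w v, u = w ++ ']' :: v ∧ PvClosed w ∧ PvClosed v := by
  have hex : ∃ j, List.count '[' (u.take j) < List.count ']' (u.take j) := by
    refine ⟨u.length, ?_⟩
    have h2 := h.2
    simp [List.count_cons] at h2
    simp [List.take_of_length_le (le_refl u.length)]
    omega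
  obtain ⟨m', hm⟩ : ∃ m', Nat.find hex = m' + 1 := by
    have : Nat.find hex ≠ 0 := by
      intro h0
      have := Nat.find_spec hex
      rw [h0] at this
      simp at this
    exact ⟨Nat.find hex - 1, by omega⟩
  have hP : List.count '[' (u.take (m' + 1)) < List.count ']' (u.take (m' + 1)) := by
    have := Nat.find_spec hex; rwa [hm] at this
  have hmin : ∀ j ≤ m', List.count ']' (u.take j) ≤ List.count '[' (u.take j) := by
    intro j hj
    have := Nat.find_min hex (m := j) (by omega)
    omega
  have hmlen : m' + 1 ≤ u.length := by
    have := Nat.find_min' hex (m := u.length) (by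
      have h2 := h.2
      simp [List.count_cons] at h2
      simp [List.take_of_length_le (le_refl u.length)]
      omega)
    omega
  have hm'lt : m' < u.length := by omega
  have htake : u.take (m' + 1) = u.take m' ++ [u[m']] := by
    rw [List.take_succ, List.getElem?_eq_getElem hm'lt]
    rfl
  have hcd : u[m'] = ']' ∧ List.count '[' (u.take m') = List.count ']' (u.take m') := by
    have hmm := hmin m' (le_refl m')
    rw [htake] at hP
    by_cases hc : u[m'] = ']'
    · refine ⟨hc, ?_⟩
      simp [List.count_append, hc] at hP
      omega
    · exfalso
      by_cases hb : u[m'] = '['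
      · simp [List.count_append, hb] at hP
        omega
      · have e1 : List.count '[' [u[m']] = 0 := by
          rw [List.count_eq_zero]
          simp only [List.mem_singleton]
          exact fun h1 => hb h1.symm
        have e2 : List.count ']' [u[m']] = 0 := by
          rw [List.count_eq_zero]
          simp only [List.mem_singleton]
          exact fun h1 => hc h1.symm
        rw [List.count_append, List.count_append, e1, e2] at hP
        omega
  have hdrop : u.drop m' = ']' :: u.drop (m' + 1) := by
    rw [List.drop_eq_getElem_cons hm'lt, hcd.1]
  refine ⟨u.take m', u.drop (m' + 1), ?_, ?_, ?_⟩
  · conv_lhs => rw [← List.take_append_drop m' u]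
    rw [hdrop]
  · constructor
    · intro p hp
      rw [List.mem_inits] at hp
      have hpl : p.length ≤ m' := by
        have hl := hp.length_le
        simp [List.length_take] at hl
        omega
      have hpe : p = u.take p.length := by
        have h1 := List.prefix_iff_eq_take.mp hp
        rw [List.take_take, min_eq_left hpl] at h1
        exact h1
      rw [hpe]
      exact hmin p.length hpl
    · exact hcd.2
  · have hu : u = u.take m' ++ ']' :: u.drop (m' + 1) := by
      conv_lhs => rw [← List.take_append_drop m' u]
      rw [hdrop]
    constructor
    · intro p hp
      rw [List.mem_inits] at hp
      obtain ⟨t, ht⟩ := hp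
      have hmem : ('[' :: (u.take m' ++ ']' :: p)) ∈ ('[' :: u).inits := by
        rw [List.mem_inits]
        refine ⟨t, ?_⟩
        have hu2 := hu
        rw [← ht] at hu2
        conv_rhs => rw [hu2]
        simp
      have := h.1 _ hmem
      have hc2 := hcd.2
      simp [List.count_cons, List.count_append] at this ⊢
      omega
    · have h2 := h.2
      rw [hu] at h2
      have hc2 := hcd.2
      simp [List.count_cons, List.count_append] at h2 ⊢
      omega

lemma pvPopTmp_spec (es : List (List Char)) (tmp : List Char) (r : List PvElem)
    (h : ∀ e ∈ es, e ≠ [']']) :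
    pvPopTmp tmp (es.map PvElem.s ++ PvElem.s [']'] :: r) =
      (tmp ++ es.flatten, PvElem.s [']'] :: r) := by
  induction es generalizing tmp with
  | nil => simp [pvPopTmp]
  | cons e es ih =>
    have he : e ≠ [']'] := h e (by simp)
    simp only [List.map_cons, List.cons_append, pvPopTmp, if_neg he]
    rw [ih (tmp ++ e) (fun x hx => h x (by simp [hx]))]
    simp [List.flatten_cons]

lemma pvFlatRep_comm (k : Nat) (x : List Char) :
    (List.replicate k x).flatten ++ x = x ++ (List.replicate k x).flatten := by
  induction k with
  | zero => simp
  | succ k ih => simp only [List.replicate_succ, List.flatten_cons, List.append_assoc, ih]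

lemma pvRep_reverse (l : List Char) (n : Int) : (pvRep l n).reverse = pvRep l.reverse n := by
  unfold pvRep
  induction n.toNat with
  | zero => simp
  | succ k ih =>
    simp only [List.replicate_succ, List.flatten_cons, List.reverse_append, ih]
    rw [pvFlatRep_comm]

lemma pvRep_mem (c : Char) (l : List Char) (n : Int) (h : c ∉ l) : c ∉ pvRep l n := by
  intro hc
  rw [pvRep, List.mem_flatten] at hc
  rcases hc with ⟨t, ht, hct⟩
  rcases List.eq_of_mem_replicate ht with rfl
  exact h hct

lemma pvStep_digit (st : List PvElem) (cur : Int) (c : Char) (hd : c.isDigit = true) :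
    pvStepA (st, cur) c = (st, cur * 10 + ((c.toNat : Int) - 48)) := by
  simp [pvStepA, hd]

lemma pvStep_open (st : List PvElem) (cur : Int) :
    pvStepA (st, cur) '[' = (PvElem.s [']'] :: PvElem.i cur :: st, 0) := by
  simp [pvStepA]

lemma pvStep_lit (st : List PvElem) (cur : Int) (c : Char) (hd : ¬ c.isDigit = true)
    (hb : c ≠ '[') (hr : c ≠ ']') :
    pvStepA (st, cur) c = (PvElem.s [c] :: st, cur) := by
  simp [pvStepA, hd, hb, hr]

lemma pvStep_close (es : List (List Char)) (st : List PvElem) (cur n : Int)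
    (h : ∀ e ∈ es, (']' : Char) ∉ e) :
    pvStepA (es.map PvElem.s ++ PvElem.s [']'] :: PvElem.i n :: st, cur) ']' =
      (PvElem.s (pvRep es.flatten n) :: st, cur) := by
  have hne : ∀ e ∈ es, e ≠ [']'] := by
    intro e he hc
    exact h e he (by rw [hc]; simp)
  simp only [pvStepA]
  rw [if_pos trivial, pvPopTmp_spec es [] (PvElem.i n :: st) hne]
  simp

lemma pvMain : ∀ (fuel : Nat) (u tail : List Char) (cur : Int) (st : List PvElem),
    u.length < fuel → PvClosed u → (tail = [] ∨ ∃ v, tail = ']' :: v) →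
    ∃ (es : List (List Char)) (curOut : Int),
      pvDecodeB fuel (u ++ tail) cur = (es.flatten.reverse, tail.tail, curOut) ∧
      List.foldl pvStepA (st, cur) u = (es.map PvElem.s ++ st, curOut) ∧
      ∀ e ∈ es, (']' : Char) ∉ e := by
  intro fuel
  induction fuel with
  | zero => intro u tail cur st hlen; exact absurd hlen (Nat.not_lt_zero _)
  | succ fuel ih =>
    intro u tail cur st hlen hcl htail
    cases u with
    | nil =>
      rcases htail with rfl | ⟨v, rfl⟩
      · exact ⟨[], cur, by simp [pvDecodeB], by simp, by simp⟩
      · refine ⟨[], cur, ?_, by simp, by simp⟩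
        simp only [List.nil_append, List.tail_cons, List.flatten_nil, List.reverse_nil]
        simp [pvDecodeB]
    | cons c u' =>
      have hlen' : u'.length < fuel := by simp at hlen; omega
      have hcr : c ≠ ']' := pvClosed_head c u' hcl
      by_cases hd : c.isDigit
      · have hb : c ≠ '[' := by rintro rfl; exact absurd hd (by decide)
        have hcl' : PvClosed u' := pvClosed_cons c u' hb hcr hcl
        obtain ⟨es, curOut, h1, h2, h3⟩ :=
          ih u' tail (cur * 10 + ((c.toNat : Int) - 48)) st hlen' hcl' htail
        refine ⟨es, curOut, ?_, ?_, h3⟩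
        · simpa only [List.cons_append, pvDecodeB, if_pos hd] using h1
        · rw [List.foldl_cons, pvStep_digit st cur c hd]; exact h2
      · by_cases hbr : c = '['
        · subst hbr
          obtain ⟨w, v', hw, hclw, hclv⟩ := pvSplit_closed u' hcl
          have hwl : w.length < fuel := by
            subst hw; simp at hlen'; omega
          have hvl : v'.length < fuel := by
            subst hw; simp at hlen'; omega
          obtain ⟨esw, cur1, hA1, hB1, h3w⟩ :=
            ih w (']' :: (v' ++ tail)) 0 (PvElem.s [']'] :: PvElem.i cur :: st)
              hwl hclw (Or.inr ⟨v' ++ tail, rfl⟩)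
          obtain ⟨esv, cur2, hA2, hB2, h3v⟩ :=
            ih v' tail cur1 (PvElem.s (pvRep esw.flatten cur) :: st) hvl hclv htail
          refine ⟨esv ++ [pvRep esw.flatten cur], cur2, ?_, ?_, ?_⟩
          · have hrest : ('[' :: u') ++ tail = '[' :: (w ++ ']' :: (v' ++ tail)) := by
              subst hw; simp
            rw [hrest]
            simp only [pvDecodeB]
            rw [if_pos trivial, hA1]
            simp [hA2, pvRep_reverse]
          · rw [List.foldl_cons, pvStep_open st cur, hw, List.foldl_append, hB1,
              List.foldl_cons, pvStep_close esw _ cur1 cur h3w, hB2]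
            simp
          · intro e he
            rcases List.mem_append.mp he with h' | h'
            · exact h3v e h'
            · rw [List.mem_singleton] at h'
              subst h'
              refine pvRep_mem _ _ _ ?_
              rw [List.mem_flatten]
              rintro ⟨t, ht, hct⟩
              exact h3w t ht hct
        · have hcl' : PvClosed u' := pvClosed_cons c u' hbr hcr hcl
          obtain ⟨es, curOut, h1, h2, h3⟩ :=
            ih u' tail cur (PvElem.s [c] :: st) hlen' hcl' htail
          refine ⟨es ++ [[c]], curOut, ?_, ?_, ?_⟩
          · simp only [List.cons_append, pvDecodeB]
            rw [if_neg hd, if_neg hbr, if_neg hcr, h1]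
            simp
          · rw [List.foldl_cons, pvStep_lit st cur c hd hbr hcr, h2]
            simp
          · intro e he
            rcases List.mem_append.mp he with h' | h'
            · exact h3 e h'
            · rw [List.mem_singleton] at h'
              subst h'
              simp [List.mem_singleton]
              exact fun h'' => hcr h''.symm

lemma pvRender_aux : ∀ (es : List (List Char)) (acc : List Char),
    (es.map PvElem.s).foldl
        (fun r e => r ++ (match e with | PvElem.s t => t.reverse | PvElem.i _ => [])) acc =
      acc ++ (es.map List.reverse).flatten := by
  intro es
  induction es with
  | nil => intro acc; simp
  | cons e es ih => intro acc; simp [ih]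

lemma pvRender_map (es : List (List Char)) :
    pvRender (es.map PvElem.s) = es.flatten.reverse := by
  unfold pvRender
  rw [← List.map_reverse, pvRender_aux, List.reverse_flatten, List.map_reverse]
  simp

theorem pv_spec_aux (s : String) (h : Pre_decodedString s) :
    decodedString s = decodedString_alt s := by
  have hcl : PvClosed s.toList := h
  obtain ⟨es, curOut, h1, h2, _⟩ :=
    pvMain (s.toList.length + 1) s.toList [] 0 [] (by omega) hcl (Or.inl rfl)
  rw [List.append_nil] at h1
  unfold decodedString decodedString_alt
  rw [h1, h2]
  simp [pvRender_map]

-- ===== VERDICT (by name: the statement is the Claim_ definition above) =====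
theorem decodedString_spec : Claim_equal_decodedString := by
  intro s _ hpre
  unfold Spec_decodedString
  exact pv_spec_aux s hpre
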